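-- pv_equiv track=rewrite | github.com/luxcem/advent-of-code | puzzles/2015/day08.py | part2
-- ===== SOURCE A (Python) =====
-- def part2(text_input: str) -> int | str:
--     result = 0
--     for line in text_input.strip().split("\n"):
--         result -= len(line)
--         line = line.replace("\\", "\\\\")
--         line = line.replace('"', '\\"')
--         line = f'"{line}"'
--         result += len(line)
--
--     return result
-- ===== SOURCE B (Python) =====
-- def part2(text_input: str) -> int:
--     lines = text_input.strip().split("\n")
--     return 2 * len(lines) + sum(l.count('"') + l.count('\\') for l in lines)
-- ===== Notes on version B (the rewrite author's own statement) =====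
-- stated objective: simpler
-- what changed: Instead of building each escaped string with two replace passes and measuring the length difference in an accumulator loop, B computes the growth per line as a closed form (2 plus the number of quote characters plus the number of backslash characters) and returns one summed expression, constructing no strings.
import Mathlib
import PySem

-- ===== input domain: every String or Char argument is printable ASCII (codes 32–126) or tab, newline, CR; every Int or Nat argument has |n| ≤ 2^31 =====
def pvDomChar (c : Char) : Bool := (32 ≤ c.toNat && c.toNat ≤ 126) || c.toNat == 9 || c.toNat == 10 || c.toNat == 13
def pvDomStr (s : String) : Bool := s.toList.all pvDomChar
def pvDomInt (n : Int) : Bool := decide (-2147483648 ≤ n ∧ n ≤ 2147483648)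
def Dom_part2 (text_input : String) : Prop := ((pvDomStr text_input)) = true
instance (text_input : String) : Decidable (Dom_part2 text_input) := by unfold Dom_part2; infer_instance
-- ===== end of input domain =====

-- B replaces A's build-escaped-string-and-measure loop by a summed closed form
-- 2*len(lines) + Σ (count '"' + count '\'): simpler, no string construction.

-- ===== PORT A =====
def part2 (text_input : String) : Int :=
  ((PySem.Str.split? (PySem.Str.strip text_input) "\n").getD []).foldl
    (fun result line =>
      let result := result - PySem.Str.len line
      let line := PySem.Str.replace line "\\" "\\\\"
      let line := PySem.Str.replace line "\"" "\\\""
      let line := "\"" ++ line ++ "\""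
      result + PySem.Str.len line) 0

-- ===== PORT B =====
def part2_alt (text_input : String) : Int :=
  let lines := (PySem.Str.split? (PySem.Str.strip text_input) "\n").getD []
  2 * PySem.List.len lines
    + (lines.map (fun l => (PySem.Str.count l "\"" : Int) + (PySem.Str.count l "\\" : Int))).sum

-- ===== PRECONDITION & SPEC =====
def Spec_part2 (text_input : String) (out : Int) : Prop := out = part2_alt text_input
instance (text_input : String) (out : Int) : Decidable (Spec_part2 text_input out) := by unfold Spec_part2; infer_instance

-- ===== CLAIM (what is proved, stated in full; the proofs are below) =====
def Claim_equal_part2 : Prop := ∀ (text_input : String), Dom_part2 text_input → Spec_part2 text_input (part2 text_input)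

-- ===== LEMMAS AND PROOFS =====

-- replace with a single-character pattern is a per-character flatMap
theorem pv_replace_go_single (c : Char) (new : List Char) (fuel : Nat) :
    ∀ (l acc : List Char), l.length ≤ fuel →
      PySem.Chars.replace.go [c] new fuel l acc
        = acc.reverse ++ l.flatMap (fun x => if x = c then new else [x]) := by
  induction fuel with
  | zero =>
    intro l acc h
    have : l = [] := List.eq_nil_of_length_eq_zero (Nat.le_zero.mp h)
    subst this
    simp [PySem.Chars.replace.go]
  | succ n ih =>
    intro l acc h
    cases l with
    | nil => simp [PySem.Chars.replace.go]
    | cons x t =>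
      by_cases hx : x = c
      · subst hx
        have : [x].isPrefixOf (x :: t) = true := by simp
        have ht : ((x :: t).drop 1).length ≤ n := by simp at h ⊢; omega
        simp only [PySem.Chars.replace.go, this, if_pos]
        rw [show List.drop [x].length (x :: t) = t from rfl, ih t (new.reverse ++ acc) (by simpa using ht)]
        simp
      · have hpre : [c].isPrefixOf (x :: t) = false := by
          simp [List.isPrefixOf]
          exact fun hc => hx hc.symm
        have ht : t.length ≤ n := by simp at h; omega
        simp only [PySem.Chars.replace.go, hpre]
        rw [ih t (x :: acc) ht]
        simp [hx]

theorem pv_replace_single (cs : List Char) (c : Char) (new : List Char) :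
    PySem.Chars.replace cs [c] new = cs.flatMap (fun x => if x = c then new else [x]) := by
  have h := pv_replace_go_single c new cs.length cs [] (le_refl _)
  simp [PySem.Chars.replace, h]

-- count with a single-character pattern is List.count
theorem pv_count_go_single (c : Char) (fuel : Nat) :
    ∀ (l : List Char) (acc : Nat), l.length ≤ fuel →
      PySem.Chars.count.go [c] fuel l acc = acc + l.count c := by
  induction fuel with
  | zero =>
    intro l acc h
    have : l = [] := List.eq_nil_of_length_eq_zero (Nat.le_zero.mp h)
    subst this
    simp [PySem.Chars.count.go]
  | succ n ih =>
    intro l acc h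
    cases l with
    | nil => simp [PySem.Chars.count.go]
    | cons x t =>
      by_cases hx : x = c
      · subst hx
        have hpre : [x].isPrefixOf (x :: t) = true := by simp
        have ht : ((x :: t).drop 1).length ≤ n := by simp at h ⊢; omega
        simp only [PySem.Chars.count.go, hpre, if_pos]
        rw [show List.drop [x].length (x :: t) = t from rfl, ih t (acc + 1) (by simpa using ht)]
        simp
        omega
      · have hpre : [c].isPrefixOf (x :: t) = false := by
          simp [List.isPrefixOf]
          exact fun hc => hx hc.symm
        have ht : t.length ≤ n := by simp at h; omega
        simp only [PySem.Chars.count.go, hpre, Bool.false_eq_true, if_false]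
        rw [ih t acc ht]
        simp [hx]

theorem pv_count_single (cs : List Char) (c : Char) :
    PySem.Chars.count cs [c] = cs.count c := by
  have h := pv_count_go_single c cs.length cs 0 (le_refl _)
  simp [PySem.Chars.count, h]

-- length of the per-character expansion with a two-character replacement
theorem pv_length_expand (cs : List Char) (c a b : Char) :
    (cs.flatMap (fun x => if x = c then [a, b] else [x])).length
      = cs.length + cs.count c := by
  induction cs with
  | nil => simp
  | cons x t ih =>
    by_cases hx : x = c
    · subst hx; simp [ih]; omega
    · simp [hx, ih]; omega

-- backslash-doubling does not change the number of quotes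
theorem pv_count_quote_expand (cs : List Char) :
    (cs.flatMap (fun x => if x = '\\' then ['\\', '\\'] else [x])).count '"'
      = cs.count '"' := by
  induction cs with
  | nil => simp
  | cons x t ih =>
    by_cases hx : x = '\\'
    · subst hx; simp [ih]
    · simp [hx, List.count_cons, ih]

-- the per-line growth is 2 + #quotes + #backslashes
theorem pv_line_growth (line : String) :
    - PySem.Str.len line
      + PySem.Str.len ("\"" ++ PySem.Str.replace (PySem.Str.replace line "\\" "\\\\") "\"" "\\\"" ++ "\"")
      = 2 + (PySem.Str.count line "\"" : Int) + (PySem.Str.count line "\\" : Int) := by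
  have hq : ("\"" : String).toList = ['"'] := by decide
  have hb : ("\\" : String).toList = ['\\'] := by decide
  have hbb : ("\\\\" : String).toList = ['\\', '\\'] := by decide
  have hbq : ("\\\"" : String).toList = ['\\', '"'] := by decide
  simp only [PySem.Str.len, PySem.Str.count_eq, String.toList_append,
    PySem.Str.toList_replace, hq, hb, hbb, hbq,
    pv_replace_single, pv_count_single]
  simp only [List.length_append, List.length_cons, pv_length_expand, pv_count_quote_expand]
  push_cast [List.length_nil]
  ring

-- the accumulator loop computes acc + 2*#lines + Σ per-line counts
theorem pv_fold_eq (lines : List String) : ∀ acc : Int,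
    lines.foldl
      (fun result line =>
        let result := result - PySem.Str.len line
        let line := PySem.Str.replace line "\\" "\\\\"
        let line := PySem.Str.replace line "\"" "\\\""
        let line := "\"" ++ line ++ "\""
        result + PySem.Str.len line) acc
    = acc + 2 * lines.length
      + (lines.map (fun l => (PySem.Str.count l "\"" : Int) + (PySem.Str.count l "\\" : Int))).sum := by
  induction lines with
  | nil => intro acc; simp
  | cons l t ih =>
    intro acc
    simp only [List.foldl_cons, List.map_cons, List.sum_cons, List.length_cons]
    rw [ih]
    have h := pv_line_growth l
    push_cast
    linarith

-- ===== VERDICT (by name: the statement is the Claim_ definition above) =====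
theorem part2_spec : Claim_equal_part2 := by
  intro text_input _
  unfold Spec_part2 part2 part2_alt
  rw [pv_fold_eq]
  simp only [PySem.List.len]
  ring
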